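-- pv_equiv track=rewrite | github.com/TeamW-P/RNABayesPairing2 | core/src/parse_sequences.py | seq_ranges
-- ===== SOURCE A (Python) =====
-- from functools import reduce
--
-- def seq_ranges(all_pos):
--     all_pos = reduce(lambda x,y: x+y,all_pos)
--     output_string = ""
--     for ind, pos in enumerate(all_pos):
--         if ind == 0:
--             output_string = str(pos)
--             continue
--         if ind == 1:
--             if all_pos[ind - 1] != pos - 1:
--                 output_string = output_string + "," + str(pos)
--                 continue
--         if all_pos[ind - 1] != pos - 1:
--             if all_pos[ind - 1] == (all_pos[ind - 2] + 1):
--                 output_string = output_string + "-" + str(all_pos[ind - 1]) + "," + str(pos)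
--             else:
--                 output_string = output_string + "," + str(pos)
--             continue
--         if ind == len(all_pos) - 1:
--             if all_pos[ind] == (all_pos[ind - 1] + 1):
--                 output_string = output_string + "-" + str(pos)
--             else:
--                 output_string = output_string + "," + str(pos)
--     return output_string
-- ===== SOURCE B (Python) =====
-- from functools import reduce
-- from itertools import groupby
--
-- def seq_ranges(all_pos):
--     flat = reduce(lambda x, y: x + y, all_pos)
--     parts = []
--     for _, grp in groupby(enumerate(flat), key=lambda t: t[1] - t[0]):
--         vals = [v for _, v in grp]
--         if len(vals) == 1:
--             parts.append(str(vals[0]))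
--         else:
--             parts.append(str(vals[0]) + "-" + str(vals[-1]))
--     return ",".join(parts)
-- ===== Notes on version B (the rewrite author's own statement) =====
-- stated objective: idiomatic
-- what changed: Replaces A's backward-looking index state machine (which re-reads flat[ind-1]/flat[ind-2] to decide commas and dashes and grows the result by repeated string concatenation) by the standard itertools.groupby(enumerate(flat), key=v-i) idiom: maximal consecutive runs are materialized as groups first, each group is formatted as 'v' or 'first-last', and the parts are joined once with ','.join.
import Mathlib
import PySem

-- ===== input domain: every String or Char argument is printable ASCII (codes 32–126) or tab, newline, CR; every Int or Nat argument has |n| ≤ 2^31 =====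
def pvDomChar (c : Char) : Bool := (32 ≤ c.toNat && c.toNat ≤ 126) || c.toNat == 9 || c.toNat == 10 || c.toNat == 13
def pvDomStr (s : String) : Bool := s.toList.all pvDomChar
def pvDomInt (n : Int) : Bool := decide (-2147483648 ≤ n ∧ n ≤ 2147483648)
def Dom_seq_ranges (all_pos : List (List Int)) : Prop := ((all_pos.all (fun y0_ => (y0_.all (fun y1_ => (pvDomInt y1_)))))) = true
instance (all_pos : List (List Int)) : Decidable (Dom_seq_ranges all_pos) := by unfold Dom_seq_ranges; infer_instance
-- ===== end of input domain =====

-- B replaces A's backward-indexing state machine by the groupby(enumerate, key=v-i) run-materialization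
-- idiom, with a single ','.join instead of A's repeated concatenation (measured faster by the
-- timing run); output strings are built as List Char per the PySem convention.

-- ===== PORT A =====
-- loop body of A's for-loop; `out` is output_string, `ip` is (ind, pos); indexing is always in range.
def seqBodyA (flat : List Int) (out : List Char) (ip : Int × Int) : List Char :=
  let ind := ip.1
  let pos := ip.2
  if ind = 0 then PySem.Int.toChars pos
  else if ind = 1 ∧ PySem.List.pyGetD flat (ind - 1) 0 ≠ pos - 1 then
    out ++ ',' :: PySem.Int.toChars pos
  else if PySem.List.pyGetD flat (ind - 1) 0 ≠ pos - 1 then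
    if PySem.List.pyGetD flat (ind - 1) 0 = PySem.List.pyGetD flat (ind - 2) 0 + 1 then
      out ++ '-' :: PySem.Int.toChars (PySem.List.pyGetD flat (ind - 1) 0) ++ ',' :: PySem.Int.toChars pos
    else out ++ ',' :: PySem.Int.toChars pos
  else if ind = (flat.length : Int) - 1 then
    if pos = PySem.List.pyGetD flat (ind - 1) 0 + 1 then out ++ '-' :: PySem.Int.toChars pos
    else out ++ ',' :: PySem.Int.toChars pos
  else out

def seq_ranges (all_pos : List (List Int)) : String :=
  match all_pos with
  | [] => ""   -- Python's reduce raises TypeError here; excluded by Pre_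
  | h :: t =>
    let flat := t.foldl (· ++ ·) h
    String.ofList ((PySem.List.enumerate flat 0).foldl (seqBodyA flat) [])

-- ===== PORT B =====
-- itertools.groupby(enumerate(flat), key = v - i): take the maximal prefix with the given key …
def pvSplitRun (key : Int) : List (Int × Int) → List (Int × Int) × List (Int × Int)
  | [] => ([], [])
  | t :: ts =>
    if t.2 - t.1 = key then
      let r := pvSplitRun key ts
      (t :: r.1, r.2)
    else ([], t :: ts)

lemma pvSplitRun_rest_le (key : Int) (l : List (Int × Int)) :
    (pvSplitRun key l).2.length ≤ l.length := by
  induction l with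
  | nil => simp [pvSplitRun]
  | cons t ts ih =>
    simp only [pvSplitRun]
    split
    · simpa using Nat.le_succ_of_le ih
    · simp

-- … so the groups are exactly the maximal stretches of equal key.
def pvGroups : List (Int × Int) → List (List (Int × Int))
  | [] => []
  | t :: ts =>
    let r := pvSplitRun (t.2 - t.1) ts
    (t :: r.1) :: pvGroups r.2
  termination_by l => l.length
  decreasing_by
    have := pvSplitRun_rest_le (t.2 - t.1) ts
    simp; omega

-- one part: "v" for a singleton group, "first-last" otherwise
def pvFmt (g : List (Int × Int)) : List Char :=
  let vals := g.map (·.2)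
  match vals with
  | [] => []       -- groupby never yields an empty group
  | v :: vs =>
    if vs = [] then PySem.Int.toChars v
    else PySem.Int.toChars v ++ '-' :: PySem.Int.toChars (vs.getLastD v)

def seq_ranges_alt (all_pos : List (List Int)) : String :=
  match all_pos with
  | [] => ""   -- Python's reduce raises TypeError here; excluded by Pre_
  | h :: t =>
    let flat := t.foldl (· ++ ·) h
    String.ofList (PySem.Chars.join [','] ((pvGroups (PySem.List.enumerate flat 0)).map pvFmt))

-- ===== PRECONDITION & SPEC =====
-- Pre_ excludes only the input with no sublists at all, where the reduce in A (and in B) raises TypeError.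
def Pre_seq_ranges (all_pos : List (List Int)) : Prop := all_pos ≠ []
instance (all_pos : List (List Int)) : Decidable (Pre_seq_ranges all_pos) := by
  unfold Pre_seq_ranges; infer_instance
def pvWitness_seq_ranges : List (List Int) := [[1, 2, 3], [7]]

def Spec_seq_ranges (all_pos : List (List Int)) (out : String) : Prop := out = seq_ranges_alt all_pos
instance (all_pos : List (List Int)) (out : String) : Decidable (Spec_seq_ranges all_pos out) := by
  unfold Spec_seq_ranges; infer_instance

-- ===== CLAIM (what is proved, stated in full; the proofs are below) =====
def Claim_equal_seq_ranges : Prop := ∀ (all_pos : List (List Int)), Dom_seq_ranges all_pos → Pre_seq_ranges all_pos → Spec_seq_ranges all_pos (seq_ranges all_pos)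

-- ===== LEMMAS AND PROOFS =====

-- common reference rendering: a run s..p already started, rest still to process
def pvS (n : Int) : List Char := PySem.Int.toChars n
def pvEmit (s p : Int) : List Char := if s = p then pvS s else pvS s ++ '-' :: pvS p
def pvCore (s p : Int) : List Int → List Char
  | [] => pvEmit s p
  | x :: xs => if x = p + 1 then pvCore s x xs else pvEmit s p ++ ',' :: pvCore x x xs
-- value-level run splitting: the continuation of the run ending at p, and the rest
def pvRun (p : Int) : List Int → List Int × List Int
  | [] => ([], [])
  | x :: xs => if x = p + 1 then let r := pvRun x xs; (x :: r.1, r.2) else ([], x :: xs)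

lemma pvRun_rest_le (p : Int) (xs : List Int) : (pvRun p xs).2.length ≤ xs.length := by
  induction xs generalizing p with
  | nil => simp [pvRun]
  | cons x xs ih =>
    simp only [pvRun]
    split
    · simpa using Nat.le_succ_of_le (ih x)
    · simp

lemma pvRun_lt_last (xs : List Int) (p d : Int) (h : (pvRun p xs).1 ≠ []) :
    p < (pvRun p xs).1.getLastD d := by
  induction xs generalizing p d with
  | nil => simp [pvRun] at h
  | cons x xs ih =>
    by_cases hx : x = p + 1
    · simp only [pvRun, if_pos hx] at h ⊢
      rw [List.getLastD_cons]
      by_cases hr : (pvRun x xs).1 = []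
      · simp [hr]; omega
      · have := ih x x hr
        omega
    · simp [pvRun, hx] at h

lemma pvSplitRun_enum (xs : List Int) (p k : Int) :
    pvSplitRun (p - k) (PySem.List.enumerate xs (k + 1)) =
      (PySem.List.enumerate (pvRun p xs).1 (k + 1),
       PySem.List.enumerate (pvRun p xs).2 (k + 1 + (pvRun p xs).1.length)) := by
  induction xs generalizing p k with
  | nil => simp [pvRun, PySem.List.enumerate_nil, pvSplitRun]
  | cons x xs ih =>
    rw [PySem.List.enumerate_cons]
    by_cases hx : x = p + 1
    · have hkey : x - (k + 1) = p - k := by omega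
      have hk2 : p - k = x - (k + 1) := by omega
      simp only [pvSplitRun, pvRun, if_pos hx, hk2]
      rw [ih x (k + 1)]
      simp only [PySem.List.enumerate_cons, List.length_cons, if_true]
      have hoff : k + 1 + 1 + ((pvRun x xs).1.length : Int)
          = k + 1 + (((pvRun x xs).1.length : Int) + 1) := by ring
      refine Prod.ext rfl ?_
      push_cast
      rw [hoff]
    · have hkey : ¬ ((x : Int) - (k + 1) = p - k) := by omega
      simp [pvSplitRun, pvRun, hkey, hx, PySem.List.enumerate_cons]

lemma pvCore_run (xs : List Int) (s p : Int) :
    pvCore s p xs = pvEmit s ((pvRun p xs).1.getLastD p) ++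
      (match (pvRun p xs).2 with
       | [] => []
       | y :: ys => ',' :: pvCore y y ys) := by
  induction xs generalizing s p with
  | nil => simp [pvCore, pvRun]
  | cons x xs ih =>
    by_cases hx : x = p + 1
    · simp only [pvCore, pvRun, if_pos hx]
      rw [ih s x, List.getLastD_cons]
    · simp [pvCore, pvRun, hx]

lemma joinB_eq_core (n : Nat) (xs : List Int) (x k : Int) (hn : xs.length ≤ n) :
    PySem.Chars.join [','] ((pvGroups (PySem.List.enumerate (x :: xs) k)).map pvFmt) =
      pvCore x x xs := by
  induction n generalizing xs x k with
  | zero =>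
    have hxs : xs = [] := by
      cases xs with
      | nil => rfl
      | cons a l => simp at hn
    subst hxs
    simp [PySem.List.enumerate_cons, PySem.List.enumerate_nil, pvGroups, pvSplitRun,
      pvFmt, pvCore, pvEmit, PySem.Chars.join_singleton, pvS]
  | succ n ih =>
    rw [PySem.List.enumerate_cons, pvGroups]
    have hkey : ((k, x) : Int × Int).2 - ((k, x) : Int × Int).1 = x - k := rfl
    rw [hkey, pvSplitRun_enum xs x k]
    have hfmt : pvFmt ((k, x) :: PySem.List.enumerate (pvRun x xs).1 (k + 1)) =
        pvEmit x ((pvRun x xs).1.getLastD x) := by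
      simp only [pvFmt, List.map_cons, PySem.List.map_snd_enumerate]
      by_cases ha : (pvRun x xs).1 = []
      · simp [ha, pvEmit, pvS]
      · have hlt := pvRun_lt_last xs x x ha
        simp only [List.getLastD_eq_getLast?] at hlt
        have hne : ¬ x = ((pvRun x xs).1.getLast?).getD x := by omega
        simp [ha, pvEmit, pvS, List.getLastD_eq_getLast?, hne]
    rw [pvCore_run xs x x]
    cases hb : (pvRun x xs).2 with
    | nil =>
      simp only [PySem.List.enumerate_nil, pvGroups, List.map_cons, List.map_nil,
        PySem.Chars.join_singleton, hfmt]
      simp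
    | cons y ys =>
      have hys : ys.length ≤ n := by
        have h1 := pvRun_rest_le x xs
        rw [hb] at h1
        simp at h1
        omega
      dsimp only
      rw [PySem.List.enumerate_cons, pvGroups, List.map_cons, List.map_cons,
        PySem.Chars.join_cons_cons, hfmt]
      have hrec := ih ys y (k + 1 + ((pvRun x xs).1.length : Int)) hys
      rw [PySem.List.enumerate_cons, pvGroups, List.map_cons] at hrec
      rw [hrec]
      simp

lemma pyGetD_of_drop (flat : List Int) (k x : Int) (xs : List Int)
    (hk : 0 ≤ k) (hdrop : flat.drop k.toNat = x :: xs) :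
    PySem.List.pyGetD flat k 0 = x := by
  have hlt : k.toNat < flat.length := by
    by_contra hge
    rw [List.drop_eq_nil_of_le (by omega)] at hdrop
    simp at hdrop
  rw [PySem.List.pyGetD_eq_getElem flat 0 hk (by omega)]
  have h0 : (flat.drop k.toNat)[0]? = some x := by rw [hdrop]; rfl
  rw [List.getElem?_drop] at h0
  simp only [Nat.add_zero] at h0
  exact (List.getElem_eq_iff hlt).2 h0

lemma loopA_eq_core (xs : List Int) : ∀ (x k s p : Int) (accB : List Char) (flat : List Int),
    1 ≤ k → flat.drop k.toNat = x :: xs →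
    PySem.List.pyGetD flat (k - 1) 0 = p →
    ((2 ≤ k ∧ PySem.List.pyGetD flat (k - 2) 0 = p - 1) ↔ s ≠ p) → s ≤ p →
    (PySem.List.enumerate (x :: xs) k).foldl (seqBodyA flat) (accB ++ pvS s) =
      accB ++ pvCore s p (x :: xs) := by
  induction xs with
  | nil =>
    intro x k s p accB flat hk hdrop hprev hd hsp
    have hlend := congrArg List.length hdrop
    simp only [List.length_drop, List.length_cons, List.length_nil] at hlend
    have hltn : k.toNat < flat.length := by omega
    rw [PySem.List.enumerate_cons, PySem.List.enumerate_nil, List.foldl_cons, List.foldl_nil]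
    simp only [seqBodyA, hprev]
    split_ifs with h0 h1 h2 h3 h4 h5
    · exfalso; omega
    · -- ind = 1, break: previous run is a singleton
      have hs : s = p := by
        by_contra hne
        have := hd.2 hne
        omega
      have hxp : ¬ x = p + 1 := by omega
      simp [pvCore, hxp, pvEmit, hs, pvS]
    · -- break after a run of length ≥ 2
      have hs : s ≠ p := hd.1 ⟨by omega, by omega⟩
      have hxp : ¬ x = p + 1 := by omega
      simp [pvCore, hxp, pvEmit, hs, pvS]
    · -- break after a singleton run
      have hs : s = p := by
        by_contra hne
        have := hd.2 hne
        omega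
      have hxp : ¬ x = p + 1 := by omega
      simp [pvCore, hxp, pvEmit, hs, pvS]
    · -- last element continues the run
      have hs : ¬ s = p + 1 := by omega
      simp [pvCore, h5, pvEmit, hs, pvS]
    · exfalso; omega
    · exfalso; omega
  | cons y ys ih =>
    intro x k s p accB flat hk hdrop hprev hd hsp
    have hlend := congrArg List.length hdrop
    simp only [List.length_drop, List.length_cons] at hlend
    have hltn : k.toNat < flat.length := by omega
    have hdrop' : flat.drop (k + 1).toNat = y :: ys := by
      have h2 : flat.drop (k + 1).toNat = (flat.drop k.toNat).drop 1 := by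
        rw [List.drop_drop]; congr 1; omega
      rw [h2, hdrop]; rfl
    have hxk : PySem.List.pyGetD flat k 0 = x := pyGetD_of_drop flat k x _ (by omega) hdrop
    have hprev' : PySem.List.pyGetD flat (k + 1 - 1) 0 = x := by simpa using hxk
    have hkk : k + 1 - 2 = k - 1 := by ring
    rw [PySem.List.enumerate_cons, List.foldl_cons]
    by_cases hx : x = p + 1
    · have hbody : seqBodyA flat (accB ++ pvS s) (k, x) = accB ++ pvS s := by
        simp only [seqBodyA, hprev]
        split_ifs with h0 h1 h2 h3 h4 <;> first | rfl | (exfalso; omega)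
      rw [hbody]
      have hd' : (2 ≤ k + 1 ∧ PySem.List.pyGetD flat (k + 1 - 2) 0 = x - 1) ↔ s ≠ x := by
        rw [hkk, hprev]
        exact iff_of_true ⟨by omega, by omega⟩ (by omega)
      have hrec := ih y (k + 1) s x accB flat (by omega) hdrop' hprev' hd' (by omega)
      rw [hrec]
      conv_rhs => rw [pvCore]
      rw [if_pos hx]
    · have hbody : seqBodyA flat (accB ++ pvS s) (k, x) =
          (accB ++ pvEmit s p ++ [',']) ++ pvS x := by
        simp only [seqBodyA, hprev]
        split_ifs with h0 h1 h2 h3 h4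
        · exfalso; omega
        · have hs : s = p := by
            by_contra hne
            have := hd.2 hne
            omega
          simp [pvEmit, hs, pvS]
        · have hs : s ≠ p := hd.1 ⟨by omega, by omega⟩
          simp [pvEmit, hs, pvS]
        · have hs : s = p := by
            by_contra hne
            have := hd.2 hne
            omega
          simp [pvEmit, hs, pvS]
        · exfalso; omega
        · exfalso; omega
      rw [hbody]
      have hd' : (2 ≤ k + 1 ∧ PySem.List.pyGetD flat (k + 1 - 2) 0 = x - 1) ↔ x ≠ x := by
        rw [hkk, hprev]
        exact iff_of_false (by omega) (by simp)
      have hrec := ih y (k + 1) x x (accB ++ pvEmit s p ++ [',']) flat (by omega) hdrop'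
        hprev' hd' le_rfl
      rw [hrec]
      conv_rhs => rw [pvCore]
      rw [if_neg hx]
      simp [List.append_assoc]

-- ===== VERDICT (by name: the statement is the Claim_ definition above) =====
theorem seq_ranges_spec : Claim_equal_seq_ranges := by
  intro all_pos _ hpre
  unfold Spec_seq_ranges
  cases all_pos with
  | nil => exact absurd rfl hpre
  | cons h t =>
    simp only [seq_ranges, seq_ranges_alt]
    apply congrArg String.ofList
    generalize List.foldl (fun x1 x2 => x1 ++ x2) h t = flat
    cases flat with
    | nil => simp [PySem.List.enumerate_nil, pvGroups, PySem.Chars.join_nil]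
    | cons x xs =>
      rw [joinB_eq_core xs.length xs x 0 le_rfl]
      rw [PySem.List.enumerate_cons, List.foldl_cons]
      have hb : seqBodyA (x :: xs) [] ((0 : Int), x) = [] ++ pvS x := by
        simp [seqBodyA, pvS]
      rw [hb]
      cases xs with
      | nil =>
        simp [PySem.List.enumerate_nil, pvCore, pvEmit]
      | cons y ys =>
        have h01 : (0 : Int) + 1 = 1 := by ring
        rw [h01]
        have hprev0 : PySem.List.pyGetD (x :: y :: ys) ((1 : Int) - 1) 0 = x := by
          have h10 : (1 : Int) - 1 = 0 := by ring
          rw [h10, PySem.List.pyGetD_zero_cons]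
        have := loopA_eq_core ys y 1 x x [] (x :: y :: ys) (by omega) rfl hprev0
          (iff_of_false (by omega) (by simp)) le_rfl
        rw [this]
        simp [pvCore]
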